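-- pv_equiv track=rewrite | github.com/j-tomasik/leetcode_problems | leetcode_problems/string_winner.py | string_winnder
-- ===== SOURCE A (Python) =====
-- def string_winnder(str):
--     count = 0
--
--     for i, char in enumerate(str):
--         if char == 'w' and i > 0 and i < len(str) - 1:
--             if str[i-1] == 'w' and str[i+1] == 'w':
--                 count += 1
--
--     for i, char in enumerate(str):
--         if char == 'b' and i > 0 and i < len(str) - 1:
--             if str[i-1] == 'b' and str[i+1] == 'b':
--                 count -= 1
--
--
--     if count <= 0:
--         return 'b'
--     else:
--         return 'w'
-- ===== SOURCE B (Python) =====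
-- def string_winnder(str):
--     count = 0
--     i = 0
--     n = len(str)
--     while i < n:
--         j = i
--         while j < n and str[j] == str[i]:
--             j += 1
--         run = j - i
--         if str[i] == 'w':
--             count += max(0, run - 2)
--         elif str[i] == 'b':
--             count -= max(0, run - 2)
--         i = j
--     return 'w' if count > 0 else 'b'
-- ===== Notes on version B (the rewrite author's own statement) =====
-- stated objective: alternative
-- what changed: Replaces A's two index-based passes (checking both neighbours of every 'w' and every 'b') by a single pass over maximal runs of equal characters, each run of length L contributing +/-max(0, L-2) to the count.
import Mathlib
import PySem

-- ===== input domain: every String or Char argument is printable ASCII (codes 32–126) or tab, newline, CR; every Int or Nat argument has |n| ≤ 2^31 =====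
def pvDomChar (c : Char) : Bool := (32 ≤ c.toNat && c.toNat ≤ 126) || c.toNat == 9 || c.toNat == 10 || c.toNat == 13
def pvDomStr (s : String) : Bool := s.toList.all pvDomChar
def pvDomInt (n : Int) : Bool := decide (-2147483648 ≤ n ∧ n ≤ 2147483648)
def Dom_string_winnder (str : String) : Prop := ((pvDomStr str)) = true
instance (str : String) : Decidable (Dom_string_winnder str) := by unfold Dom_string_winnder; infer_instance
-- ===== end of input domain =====

-- B replaces A's two index-based passes over the string by a single run-length scan
-- (each maximal run of 'w'/'b' of length L contributes ±max 0 (L-2)); objective: alternative single-pass algorithm.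

-- ===== PORT A =====
-- shared body of A's two loops: add dlt when the char at index p.1 equals c and both neighbours equal c
def triStep (l : List Char) (c : Char) (dlt : Int) (acc : Int) (p : Int × Char) : Int :=
  if p.2 = c ∧ 0 < p.1 ∧ p.1 < (l.length : Int) - 1 ∧
      PySem.List.pyGet? l (p.1 - 1) = some c ∧ PySem.List.pyGet? l (p.1 + 1) = some c
  then acc + dlt else acc

def string_winnder (str : String) : String :=
  let l := str.toList
  let count1 : Int := (PySem.List.enumerate l 0).foldl (triStep l 'w' 1) 0
  let count2 : Int := (PySem.List.enumerate l 0).foldl (triStep l 'b' (-1)) count1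
  if count2 ≤ 0 then "b" else "w"

-- ===== PORT B =====
-- one pass over maximal runs of equal characters (B's outer/inner while loops)
def runCount : List Char → Int
  | [] => 0
  | c :: rest =>
    let run : Int := 1 + (rest.takeWhile (fun x => x = c)).length
    let contrib : Int := max 0 (run - 2)
    (if c = 'w' then contrib else if c = 'b' then -contrib else 0)
      + runCount (rest.dropWhile (fun x => x = c))
termination_by l => l.length
decreasing_by exact Nat.lt_succ_of_le (List.length_dropWhile_le _ _)

def string_winnder_alt (str : String) : String :=
  if 0 < runCount str.toList then "w" else "b"

-- ===== PRECONDITION & SPEC =====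
def Spec_string_winnder (str : String) (out : String) : Prop := out = string_winnder_alt str
instance (str : String) (out : String) : Decidable (Spec_string_winnder str out) := by unfold Spec_string_winnder; infer_instance

-- ===== CLAIM =====
def Claim_equal_string_winnder : Prop := ∀ (str : String), Dom_string_winnder str → Spec_string_winnder str (string_winnder str)

-- ===== LEMMAS AND PROOFS =====

-- number of indices whose char and both neighbours equal c, as a window recursion carrying the previous char
def cwin (c : Char) : Option Char → List Char → Int
  | _, [] => 0
  | prev, x :: rest =>
    (if prev = some c ∧ x = c ∧ rest.head? = some c then 1 else 0) + cwin c (some x) rest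

-- A-side: each of A's folds computes dlt * (window count)
theorem foldl_triStep (c : Char) (dlt : Int) :
    ∀ (suf : List Char) (l : List Char) (k : Nat) (prev : Option Char) (acc : Int),
      l.drop k = suf →
      prev = (if k = 0 then none else l[k-1]?) →
      (PySem.List.enumerate suf (k : Int)).foldl (triStep l c dlt) acc
        = acc + dlt * cwin c prev suf := by
  intro suf
  induction suf with
  | nil => intro l k prev acc _ _; simp [PySem.List.enumerate_nil, cwin]
  | cons x rest ih =>
    intro l k prev acc hdrop hprev
    have hk : k < l.length := by
      by_contra hle
      rw [List.drop_eq_nil_of_le (by omega)] at hdrop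
      exact List.cons_ne_nil x rest hdrop.symm
    have hxk : l[k]? = some x := by
      rw [← List.head?_drop, hdrop]; rfl
    have hdrop' : l.drop (k + 1) = rest := by
      rw [← List.tail_drop, hdrop]; rfl
    have hnext : l[k + 1]? = rest.head? := by
      rw [← List.head?_drop, hdrop']
    rw [PySem.List.enumerate_cons, List.foldl_cons,
      show (k : Int) + 1 = ((k + 1 : Nat) : Int) by push_cast; ring,
      ih l (k + 1) (some x) _ hdrop' (by simp [hxk])]
    have hCiff : (x = c ∧ 0 < (k : Int) ∧ (k : Int) < (l.length : Int) - 1 ∧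
        PySem.List.pyGet? l ((k : Int) - 1) = some c ∧ PySem.List.pyGet? l ((k : Int) + 1) = some c)
        ↔ (prev = some c ∧ x = c ∧ rest.head? = some c) := by
      constructor
      · rintro ⟨hx, hk0, _, hgm, hgp⟩
        have hkpos : 0 < k := by exact_mod_cast hk0
        rw [show (k : Int) - 1 = ((k - 1 : Nat) : Int) by omega,
          PySem.List.pyGet?_natCast] at hgm
        rw [show (k : Int) + 1 = ((k + 1 : Nat) : Int) by push_cast; ring,
          PySem.List.pyGet?_natCast, hnext] at hgp
        refine ⟨?_, hx, hgp⟩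
        rw [hprev, if_neg (by omega)]; exact hgm
      · rintro ⟨hp, hx, hh⟩
        have hkpos : 0 < k := by
          by_contra h0
        -- k = 0 would force prev = none
          rw [hprev, if_pos (by omega)] at hp; simp at hp
        rw [hprev, if_neg (by omega)] at hp
        have hg1 : l[k + 1]? = some c := by rw [hnext]; exact hh
        have hlt : k + 1 < l.length := (List.getElem?_eq_some_iff.mp hg1).1
        refine ⟨hx, by exact_mod_cast hkpos, by omega, ?_, ?_⟩
        · rw [show (k : Int) - 1 = ((k - 1 : Nat) : Int) by omega,
            PySem.List.pyGet?_natCast]; exact hp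
        · rw [show (k : Int) + 1 = ((k + 1 : Nat) : Int) by push_cast; ring,
            PySem.List.pyGet?_natCast]; exact hg1
    show triStep l c dlt acc ((k : Int), x) + dlt * cwin c (some x) rest
        = acc + dlt * cwin c prev (x :: rest)
    unfold triStep
    simp only [cwin, hCiff]
    by_cases hI : prev = some c ∧ x = c ∧ rest.head? = some c
    · rw [if_pos hI, if_pos hI]; ring
    · rw [if_neg hI, if_neg hI]; ring

-- B-side helper: windows of c strictly inside a maximal run, entered with prev = c
theorem cwin_inner (c : Char) :
    ∀ (L : Nat) (d : List Char), d.head? ≠ some c →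
      cwin c (some c) (List.replicate L c ++ d)
        = max 0 ((L : Int) - 1) + cwin c (some c) d := by
  intro L
  induction L with
  | zero => intro d _; simp
  | succ n ih =>
    intro d hd
    rw [List.replicate_succ, List.cons_append]
    simp only [cwin]
    rw [ih d hd]
    cases n with
    | zero => simp [hd]
    | succ m =>
      rw [if_pos (by simp [List.replicate_succ])]
      push_cast
      have h1 : max (0 : Int) ((m : Int) + 1 - 1) = m := by omega
      have h2 : max (0 : Int) ((m : Int) + 1 + 1 - 1) = m + 1 := by omega
      rw [h1, h2]; ring

-- B-side helper: a run of c contributes max 0 (L-2) windows of c when entered with prev ≠ c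
theorem cwin_run (c : Char) :
    ∀ (L : Nat) (p : Option Char) (d : List Char), 1 ≤ L → p ≠ some c → d.head? ≠ some c →
      cwin c p (List.replicate L c ++ d)
        = max 0 ((L : Int) - 2) + cwin c (some c) d := by
  intro L p d hL hp hd
  obtain ⟨n, rfl⟩ : ∃ n, L = n + 1 := ⟨L - 1, by omega⟩
  rw [List.replicate_succ, List.cons_append]
  simp only [cwin]
  rw [if_neg (by rintro ⟨h, -, -⟩; exact hp h), cwin_inner c n d hd]
  push_cast
  have : max (0 : Int) ((n : Int) - 1) = max 0 ((n : Int) + 1 - 2) := by omega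
  rw [this]; ring

-- B-side helper: a run of c is transparent for windows of another char ch
theorem cwin_other (c ch : Char) (hne : ch ≠ c) :
    ∀ (L : Nat) (p : Option Char) (d : List Char), 1 ≤ L →
      cwin ch p (List.replicate L c ++ d) = cwin ch (some c) d := by
  intro L p d hL
  obtain ⟨n, rfl⟩ : ∃ n, L = n + 1 := ⟨L - 1, by omega⟩
  clear hL
  induction n generalizing p with
  | zero =>
    simp only [List.replicate_succ, List.replicate_zero, List.cons_append, List.nil_append, cwin]
    rw [if_neg (by rintro ⟨-, h, -⟩; exact hne (h.symm ▸ rfl))]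
    ring
  | succ m ih =>
    rw [List.replicate_succ, List.cons_append]
    simp only [cwin]
    rw [if_neg (by rintro ⟨-, h, -⟩; exact hne (h.symm ▸ rfl)), ih (some c)]
    ring

theorem runCount_eq :
    ∀ (l : List Char) (prev : Option Char), (∀ x, l.head? = some x → prev ≠ some x) →
      runCount l = cwin 'w' prev l - cwin 'b' prev l := by
  intro l
  induction l using runCount.induct with
  | case1 => intro prev _; simp [runCount, cwin]
  | case2 c rest ih =>
    intro prev hprev
    have hp : prev ≠ some c := hprev c rfl
    have hrest : rest = rest.takeWhile (fun x => x = c) ++ rest.dropWhile (fun x => x = c) :=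
      (List.takeWhile_append_dropWhile).symm
    have hrep : rest.takeWhile (fun x => x = c)
        = List.replicate (rest.takeWhile (fun x => x = c)).length c := by
      apply List.eq_replicate_of_mem
      intro b hb
      have := List.mem_takeWhile_imp hb
      simpa using this
    have hsplit : c :: rest
        = List.replicate ((rest.takeWhile (fun x => x = c)).length + 1) c
            ++ rest.dropWhile (fun x => x = c) := by
      conv_lhs => rw [hrest, hrep]
      rw [← List.cons_append, ← List.replicate_succ]
    have hdhead : (rest.dropWhile (fun x => x = c)).head? ≠ some c := by
      intro h
      have := List.head?_dropWhile_not (fun x => x = c) rest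
      rw [h] at this
      simp at this
    have hih := ih (some c) (by intro x hx h; rw [h] at hdhead; exact hdhead hx)
    have hL : 1 ≤ (rest.takeWhile (fun x => x = c)).length + 1 := by omega
    simp only [runCount]
    by_cases hw : c = 'w'
    · subst hw
      rw [hsplit, cwin_run 'w' _ prev _ hL hp hdhead,
        cwin_other 'w' 'b' (by decide) _ prev _ hL, hih]
      rw [if_pos rfl]
      rw [show (1 : Int) + ((rest.takeWhile (fun x => x = 'w')).length : Int) - 2
          = (((rest.takeWhile (fun x => x = 'w')).length + 1 : Nat) : Int) - 2 by push_cast; ring]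
      ring
    · by_cases hb : c = 'b'
      · subst hb
        rw [hsplit, cwin_other 'b' 'w' (by decide) _ prev _ hL,
          cwin_run 'b' _ prev _ hL hp hdhead, hih]
        rw [if_neg (by decide), if_pos rfl]
        rw [show (1 : Int) + ((rest.takeWhile (fun x => x = 'b')).length : Int) - 2
            = (((rest.takeWhile (fun x => x = 'b')).length + 1 : Nat) : Int) - 2 by push_cast; ring]
        ring
      · rw [hsplit, cwin_other c 'w' (Ne.symm hw) _ prev _ hL,
          cwin_other c 'b' (Ne.symm hb) _ prev _ hL, hih]
        rw [if_neg hw, if_neg hb]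
        ring

-- ===== VERDICT =====
theorem string_winnder_spec : Claim_equal_string_winnder := by
  intro s _
  unfold Spec_string_winnder string_winnder string_winnder_alt
  have h1 := foldl_triStep 'w' 1 s.toList s.toList 0 none 0 rfl rfl
  have h2 := foldl_triStep 'b' (-1) s.toList s.toList 0 none
      ((PySem.List.enumerate s.toList 0).foldl (triStep s.toList 'w' 1) 0) rfl rfl
  have hr := runCount_eq s.toList none (by intro x _ h; cases h)
  push_cast at h1 h2
  simp only []
  rw [h2, h1, hr]
  by_cases h : 0 < cwin 'w' none s.toList - cwin 'b' none s.toList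
  · rw [if_pos h, if_neg (by omega)]
  · rw [if_neg h, if_pos (by omega)]
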